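/- GENERATED by farm/mkstatement.py from design/units.tsv (unit `start_decoder.F4e`) and the assertions of Vorbis/Spec/StartDecoderF4.lean — do not edit.
   THE STATEMENT of the proof unit `start_decoder.F4e`: segment F4e of `start_decoder` (21 instructions; entries 0x115513;
   exits 0x1154ee,0x113b22; ranges 0x115513-0x11555c + 0x1155ac-0x1155b9)
   takes each of its entry assertions to one of its exit assertions (`Vorbis.Spec.StartDecoder.SegF4e`), given the contracts of its callees.
   What the names mean: Vorbis/Spec/Basic.lean (the shared hypotheses), Vorbis/Spec/StartDecoderF4.lean (the assertions). The theorem to prove: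
   `theorem start_decoder_F4e_ok : Vorbis.Spec.start_decoder_F4e.Statement`. -/
import Vorbis.Spec.Leaves
import Vorbis.Spec.StartDecoderF4
namespace Vorbis.Spec.start_decoder_F4e
open X86 X86.User Asan

/-- The statement of unit `start_decoder.F4e`. -/
def Statement : Prop :=
  ∀ (Lay : Layout) (_hLay : Lay.hi = 0x1000000) (μ : Microarch) (_hμ : UserX.MicroOK μ) (u₀ : State)
    (_hcode : HasCodeNat Lay u₀ Vorbis.L.start_decoder.entry Vorbis.Code.code_start_decoder.nat Vorbis.L.start_decoder.size)
    (_h_asan_store2_noabort : Asan.SmallCheck Lay μ Vorbis.WayInv (Vorbis.CodeOK u₀) [.rax, .rcx, .rdx] 2 Vorbis.L.__asan_store2_noabort.entry)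
    (_h_asan_load4_noabort : Asan.SmallCheck Lay μ Vorbis.WayInv (Vorbis.CodeOK u₀) [.rax, .rcx, .rdx] 4 Vorbis.L.__asan_load4_noabort.entry)
    (_h_error : ∀ (others : List Obj) (frames : List (Nat × FrameLayout)), Calls Lay μ Vorbis.WayInv (Vorbis.conv u₀) Vorbis.L.error.entry (Vorbis.Spec.error.spec others frames)),
    Vorbis.Spec.StartDecoder.SegF4e Lay μ u₀

end Vorbis.Spec.start_decoder_F4e
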